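-- pv_equiv track=rewrite | github.com/indragit143/HMIAutiomation | Library/DeviceOperation.py | getCoords_virkeypad
-- ===== SOURCE A (Python) =====
-- def getCoords_virkeypad(value,gold_coord_x,gold_coord_y):
--     keypad_layout = [[1, 2, 3], [4, 5, 6], [7, 8, 9], [10, 0, 11]]
--     key_coord_x = []
--     key_coord_y = []
--     for item in range(len(value)):
--         for row in range(len(keypad_layout)):
--             for column in range(len(keypad_layout[row])):
--                 if keypad_layout[row][column] == int(value[item]):
--                     if row <= 2:
--                         key_coord_x.append(gold_coord_x - (70 * (3 - column)))
--                         key_coord_y.append(gold_coord_y - (35 * (5 - (row * 2))))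
--                     if row == 3:
--                         key_coord_x.append(gold_coord_x - (70 * (3 - column)))
--                         key_coord_y.append(gold_coord_y + 35)
--     return [key_coord_x, key_coord_y]
-- ===== SOURCE B (Python) =====
-- def getCoords_virkeypad(value, gold_coord_x, gold_coord_y):
--     key_coord_x = []
--     key_coord_y = []
--     for ch in value:
--         d = int(ch)
--         if d == 0:
--             column, dy = 1, 35
--         else:
--             row, column = divmod(d - 1, 3)
--             dy = -35 * (5 - 2 * row)
--         key_coord_x.append(gold_coord_x - 70 * (3 - column))
--         key_coord_y.append(gold_coord_y + dy)
--     return [key_coord_x, key_coord_y]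
-- ===== Notes on version B (the rewrite author's own statement) =====
-- stated objective: simpler
-- what changed: Replaces the triple nested scan of the 12-cell keypad layout per character with a single pass that computes each digit's row/column directly by divmod(d-1,3) (0 handled as the bottom-row key), so no keypad table is scanned at all.
import Mathlib
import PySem

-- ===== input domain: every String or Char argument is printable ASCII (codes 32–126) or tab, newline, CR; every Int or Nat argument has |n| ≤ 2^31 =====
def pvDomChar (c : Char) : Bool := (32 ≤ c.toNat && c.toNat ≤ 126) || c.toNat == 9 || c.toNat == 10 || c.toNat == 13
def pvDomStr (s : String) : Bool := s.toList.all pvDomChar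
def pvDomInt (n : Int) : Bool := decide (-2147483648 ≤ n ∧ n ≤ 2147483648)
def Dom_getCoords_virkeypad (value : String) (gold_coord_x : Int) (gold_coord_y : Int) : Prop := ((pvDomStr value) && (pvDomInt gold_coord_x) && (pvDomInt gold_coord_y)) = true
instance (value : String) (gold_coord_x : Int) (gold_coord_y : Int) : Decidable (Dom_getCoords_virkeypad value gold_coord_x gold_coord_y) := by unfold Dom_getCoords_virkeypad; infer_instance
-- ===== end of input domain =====

-- B replaces A's per-character triple nested scan of the 12-cell keypad layout with a single
-- pass computing each digit's row/column in closed form via divmod(d-1, 3) (objective: simpler).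

-- ===== PORT A =====
-- body of A's outer loop: the nested scan of the keypad layout for one character
def pvInnerA (gold_coord_x gold_coord_y : Int) (st : List Int × List Int) (c : Char) : List Int × List Int :=
  let keypad_layout : List (List Int) := [[1, 2, 3], [4, 5, 6], [7, 8, 9], [10, 0, 11]]
  (PySem.List.pyRange 0 (keypad_layout.length : Int) 1).foldl (fun st row =>
    let rowList := (PySem.List.pyGet? keypad_layout row).getD []
    (PySem.List.pyRange 0 (rowList.length : Int) 1).foldl (fun st column =>
      if (PySem.List.pyGet? rowList column).getD 0 = (PySem.Int.ofChars? [c]).getD 0 then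
        let st1 := if row ≤ 2 then
            (st.1 ++ [gold_coord_x - 70 * (3 - column)], st.2 ++ [gold_coord_y - 35 * (5 - row * 2)])
          else st
        if row = 3 then
          (st1.1 ++ [gold_coord_x - 70 * (3 - column)], st1.2 ++ [gold_coord_y + 35])
        else st1
      else st) st) st

def getCoords_virkeypad (value : String) (gold_coord_x : Int) (gold_coord_y : Int) : List (List Int) :=
  let cs := value.toList
  let st := (PySem.List.pyRange 0 (cs.length : Int) 1).foldl
    (fun st item => pvInnerA gold_coord_x gold_coord_y st (PySem.List.pyGetD cs item ' ')) ([], [])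
  [st.1, st.2]

-- ===== PORT B =====
-- one step of B: closed-form column/dy for one digit character
def pvStepB (gold_coord_x gold_coord_y : Int) (st : List Int × List Int) (c : Char) : List Int × List Int :=
  let d := (PySem.Int.ofChars? [c]).getD 0
  let cd : Int × Int :=
    if d = 0 then (1, 35)
    else (PySem.Int.mod (d - 1) 3, -35 * (5 - 2 * PySem.Int.floordiv (d - 1) 3))
  (st.1 ++ [gold_coord_x - 70 * (3 - cd.1)], st.2 ++ [gold_coord_y + cd.2])

def getCoords_virkeypad_alt (value : String) (gold_coord_x : Int) (gold_coord_y : Int) : List (List Int) :=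
  let st := value.toList.foldl (pvStepB gold_coord_x gold_coord_y) ([], [])
  [st.1, st.2]

-- ===== PRECONDITION & SPEC =====
-- Pre_ excludes exactly the inputs on which A raises: int(value[item]) throws ValueError
-- whenever some character of value is not one of '0'..'9' (B raises there too).
def Pre_getCoords_virkeypad (value : String) (gold_coord_x : Int) (gold_coord_y : Int) : Prop :=
  (value.toList.all (fun c => decide (c ∈ ['0','1','2','3','4','5','6','7','8','9']))) = true
instance (value : String) (gold_coord_x : Int) (gold_coord_y : Int) : Decidable (Pre_getCoords_virkeypad value gold_coord_x gold_coord_y) := by unfold Pre_getCoords_virkeypad; infer_instance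
def pvWitness_getCoords_virkeypad : String × Int × Int := ("407", 100, 200)

def Spec_getCoords_virkeypad (value : String) (gold_coord_x : Int) (gold_coord_y : Int) (out : List (List Int)) : Prop := out = getCoords_virkeypad_alt value gold_coord_x gold_coord_y
instance (value : String) (gold_coord_x : Int) (gold_coord_y : Int) (out : List (List Int)) : Decidable (Spec_getCoords_virkeypad value gold_coord_x gold_coord_y out) := by unfold Spec_getCoords_virkeypad; infer_instance

-- ===== CLAIM (what is proved, stated in full; the proofs are below) =====
def Claim_equal_getCoords_virkeypad : Prop := ∀ (value : String) (gold_coord_x : Int) (gold_coord_y : Int), Dom_getCoords_virkeypad value gold_coord_x gold_coord_y → Pre_getCoords_virkeypad value gold_coord_x gold_coord_y → Spec_getCoords_virkeypad value gold_coord_x gold_coord_y (getCoords_virkeypad value gold_coord_x gold_coord_y)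

-- ===== LEMMAS AND PROOFS =====
-- For each digit character, A's keypad scan appends exactly what B's closed form appends.
theorem pvInnerA_eq_pvStepB (gx gy : Int) (st : List Int × List Int) (c : Char)
    (hc : c ∈ ['0','1','2','3','4','5','6','7','8','9']) :
    pvInnerA gx gy st c = pvStepB gx gy st c := by
  fin_cases hc <;>
    simp [pvInnerA, pvStepB, PySem.List.pyRange, PySem.List.pyGet?, PySem.List.pyIdx?,
      List.range_succ,
      show (PySem.Int.ofChars? ['0']).getD 0 = (0 : Int) from by decide, show (PySem.Int.ofChars? ['1']).getD 0 = (1 : Int) from by decide,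
      show (PySem.Int.ofChars? ['2']).getD 0 = (2 : Int) from by decide, show (PySem.Int.ofChars? ['3']).getD 0 = (3 : Int) from by decide,
      show (PySem.Int.ofChars? ['4']).getD 0 = (4 : Int) from by decide, show (PySem.Int.ofChars? ['5']).getD 0 = (5 : Int) from by decide,
      show (PySem.Int.ofChars? ['6']).getD 0 = (6 : Int) from by decide, show (PySem.Int.ofChars? ['7']).getD 0 = (7 : Int) from by decide,
      show (PySem.Int.ofChars? ['8']).getD 0 = (8 : Int) from by decide, show (PySem.Int.ofChars? ['9']).getD 0 = (9 : Int) from by decide,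
      show PySem.Int.mod 0 3 = 0 from by decide, show PySem.Int.mod 1 3 = 1 from by decide,
      show PySem.Int.mod 2 3 = 2 from by decide, show PySem.Int.mod 3 3 = 0 from by decide,
      show PySem.Int.mod 4 3 = 1 from by decide, show PySem.Int.mod 5 3 = 2 from by decide,
      show PySem.Int.mod 6 3 = 0 from by decide, show PySem.Int.mod 7 3 = 1 from by decide,
      show PySem.Int.mod 8 3 = 2 from by decide,
      show PySem.Int.floordiv 0 3 = 0 from by decide, show PySem.Int.floordiv 1 3 = 0 from by decide,
      show PySem.Int.floordiv 2 3 = 0 from by decide, show PySem.Int.floordiv 3 3 = 1 from by decide,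
      show PySem.Int.floordiv 4 3 = 1 from by decide, show PySem.Int.floordiv 5 3 = 1 from by decide,
      show PySem.Int.floordiv 6 3 = 2 from by decide, show PySem.Int.floordiv 7 3 = 2 from by decide,
      show PySem.Int.floordiv 8 3 = 2 from by decide] <;> omega

-- ===== VERDICT (by name: the statement is the Claim_ definition above) =====
theorem getCoords_virkeypad_spec : Claim_equal_getCoords_virkeypad := by
  intro value gx gy _ hpre
  unfold Pre_getCoords_virkeypad at hpre
  simp only [List.all_eq_true, decide_eq_true_eq] at hpre
  unfold Spec_getCoords_virkeypad
  simp only [getCoords_virkeypad, getCoords_virkeypad_alt]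
  rw [PySem.List.foldl_pyRange_zero_pyGetD' value.toList ' ' (pvInnerA gx gy) ([], [])]
  rw [show List.foldl (pvInnerA gx gy) (([], []) : List Int × List Int) value.toList
        = List.foldl (pvStepB gx gy) ([], []) value.toList from
      PySem.List.foldl_congr_mem value.toList (pvInnerA gx gy) (pvStepB gx gy) ([], [])
        (fun acc x hx => pvInnerA_eq_pvStepB gx gy acc x (hpre x hx))]
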